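-- pv_equiv track=rewrite | github.com/mariotaddeucci/chartset-normalizer-python-rs | src/charsetrs/__init__.py | _encodings_are_equivalent
-- ===== SOURCE A (Python) =====
-- def _encodings_are_equivalent(source_enc: str, target_enc: str) -> bool:
--     """Check if two encoding names are equivalent, considering common aliases."""
--     source_normalized = source_enc.lower().replace("-", "_")
--     target_normalized = target_enc.lower().replace("-", "_")
--
--     if source_normalized == target_normalized:
--         return True
--
--     # Map common encoding aliases
--     encoding_aliases = {
--         "utf_8": ["utf8"],
--         "utf_16": ["utf16"],
--         "latin_1": ["iso_8859_1", "latin1"],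
--         "cp1252": ["windows_1252"],
--     }
--
--     # Check if both encodings are aliases of the same canonical encoding
--     for canonical, aliases in encoding_aliases.items():
--         # Include canonical name in the set of valid aliases
--         all_aliases = {canonical, *aliases}
--         if source_normalized in all_aliases and target_normalized in all_aliases:
--             return True
--
--     return False
-- ===== SOURCE B (Python) =====
-- _ALIAS_TO_GROUP = {
--     "utf_8": "utf_8", "utf8": "utf_8",
--     "utf_16": "utf_16", "utf16": "utf_16",
--     "latin_1": "latin_1", "iso_8859_1": "latin_1", "latin1": "latin_1",
--     "cp1252": "cp1252", "windows_1252": "cp1252",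
-- }
--
--
-- def _encodings_are_equivalent(source_enc: str, target_enc: str) -> bool:
--     source_normalized = source_enc.lower().replace("-", "_")
--     target_normalized = target_enc.lower().replace("-", "_")
--     if source_normalized == target_normalized:
--         return True
--     group = _ALIAS_TO_GROUP.get(source_normalized)
--     return group is not None and group == _ALIAS_TO_GROUP.get(target_normalized)
-- ===== Notes on version B (the rewrite author's own statement) =====
-- stated objective: simpler
-- what changed: The loop over alias groups with per-group set construction is replaced by one precomputed flat alias->canonical-group dict and two lookups compared for equality (guarded by 'is not None').
import Mathlib
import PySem

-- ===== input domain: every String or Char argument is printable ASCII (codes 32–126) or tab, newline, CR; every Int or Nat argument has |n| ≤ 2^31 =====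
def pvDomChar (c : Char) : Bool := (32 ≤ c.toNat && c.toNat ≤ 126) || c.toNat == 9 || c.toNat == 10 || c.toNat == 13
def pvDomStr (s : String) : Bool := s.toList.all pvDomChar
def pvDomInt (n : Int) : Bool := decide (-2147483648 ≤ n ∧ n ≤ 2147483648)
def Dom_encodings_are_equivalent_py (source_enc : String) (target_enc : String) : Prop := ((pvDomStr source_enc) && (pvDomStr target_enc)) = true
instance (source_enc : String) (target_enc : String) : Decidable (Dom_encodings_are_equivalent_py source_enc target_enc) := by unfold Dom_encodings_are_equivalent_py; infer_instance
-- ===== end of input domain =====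

-- B replaces A's per-call scan over alias groups (building a set per group) by two lookups
-- into one precomputed flat alias -> canonical-group dict; objective: simpler.

-- ===== PORT A =====
-- s.lower().replace("-", "_")   (shared normalization, identical in A and B)
def pvNorm (s : String) : String := PySem.Str.replace (PySem.Str.lower s) "-" "_"

-- the literal dict 'encoding_aliases' as its items
def pvGroups : List (String × List String) :=
  [("utf_8", ["utf8"]),
   ("utf_16", ["utf16"]),
   ("latin_1", ["iso_8859_1", "latin1"]),
   ("cp1252", ["windows_1252"])]

-- the 'for canonical, aliases in encoding_aliases.items()' loop
def pvLoopA (s t : String) : List (String × List String) → Bool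
  | [] => false
  | (canonical, aliases) :: rest =>
      let all_aliases : PySem.Set String := PySem.Set.ofList (canonical :: aliases)
      if all_aliases.contains s && all_aliases.contains t then true
      else pvLoopA s t rest

def encodings_are_equivalent_py (source_enc : String) (target_enc : String) : Bool :=
  let source_normalized := pvNorm source_enc
  let target_normalized := pvNorm target_enc
  if source_normalized == target_normalized then true
  else pvLoopA source_normalized target_normalized pvGroups

-- ===== PORT B =====
-- the module-level flat dict _ALIAS_TO_GROUP of Source B
def pvAliasToGroup : PySem.Dict String String :=
  PySem.Dict.ofList
    [("utf_8", "utf_8"), ("utf8", "utf_8"),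
     ("utf_16", "utf_16"), ("utf16", "utf_16"),
     ("latin_1", "latin_1"), ("iso_8859_1", "latin_1"), ("latin1", "latin_1"),
     ("cp1252", "cp1252"), ("windows_1252", "cp1252")]

def encodings_are_equivalent_py_alt (source_enc : String) (target_enc : String) : Bool :=
  let source_normalized := pvNorm source_enc
  let target_normalized := pvNorm target_enc
  if source_normalized == target_normalized then true
  else
    let group := pvAliasToGroup.get? source_normalized
    group.isSome && group == pvAliasToGroup.get? target_normalized

-- ===== PRECONDITION & SPEC =====
def Spec_encodings_are_equivalent_py (source_enc : String) (target_enc : String) (out : Bool) : Prop := out = encodings_are_equivalent_py_alt source_enc target_enc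
instance (source_enc : String) (target_enc : String) (out : Bool) : Decidable (Spec_encodings_are_equivalent_py source_enc target_enc out) := by unfold Spec_encodings_are_equivalent_py; infer_instance

-- ===== CLAIM (what is proved, stated in full; the proofs are below) =====
def Claim_equal_encodings_are_equivalent_py : Prop := ∀ (source_enc : String) (target_enc : String), Dom_encodings_are_equivalent_py source_enc target_enc → Spec_encodings_are_equivalent_py source_enc target_enc (encodings_are_equivalent_py source_enc target_enc)

-- ===== LEMMAS AND PROOFS =====
set_option maxHeartbeats 1000000 in
theorem pv_key (s t : String) :
    pvLoopA s t pvGroups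
      = ((pvAliasToGroup.get? s).isSome && (pvAliasToGroup.get? s == pvAliasToGroup.get? t)) := by
  have hd : pvAliasToGroup = PySem.Dict.mk
      [("utf_8", "utf_8"), ("utf8", "utf_8"), ("utf_16", "utf_16"), ("utf16", "utf_16"),
       ("latin_1", "latin_1"), ("iso_8859_1", "latin_1"), ("latin1", "latin_1"),
       ("cp1252", "cp1252"), ("windows_1252", "cp1252")] := by decide
  have e1 : PySem.Set.ofList ["utf_8", "utf8"] = ["utf_8", "utf8"] := by decide
  have e2 : PySem.Set.ofList ["utf_16", "utf16"] = ["utf_16", "utf16"] := by decide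
  have e3 : PySem.Set.ofList ["latin_1", "iso_8859_1", "latin1"] = ["latin_1", "iso_8859_1", "latin1"] := by decide
  have e4 : PySem.Set.ofList ["cp1252", "windows_1252"] = ["cp1252", "windows_1252"] := by decide
  have e0 : ∀ u : String, (PySem.Dict.mk ([] : List (String × String))).get? u = none := by
    intro u; simp [PySem.Dict.get?]
  by_cases h0 : s = "utf_8"
  · subst h0
    simp [pvGroups, pvLoopA, hd, e1, e2, e3, e4, PySem.Set.contains, PySem.Dict.get?_mk_cons, e0]
    split_ifs <;> (try subst_vars) <;> simp_all <;> simp_all [eq_comm]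
  by_cases h1 : s = "utf8"
  · subst h1
    simp [pvGroups, pvLoopA, hd, e1, e2, e3, e4, PySem.Set.contains, PySem.Dict.get?_mk_cons, e0]
    split_ifs <;> (try subst_vars) <;> simp_all <;> simp_all [eq_comm]
  by_cases h2 : s = "utf_16"
  · subst h2
    simp [pvGroups, pvLoopA, hd, e1, e2, e3, e4, PySem.Set.contains, PySem.Dict.get?_mk_cons, e0]
    split_ifs <;> (try subst_vars) <;> simp_all <;> simp_all [eq_comm]
  by_cases h3 : s = "utf16"
  · subst h3
    simp [pvGroups, pvLoopA, hd, e1, e2, e3, e4, PySem.Set.contains, PySem.Dict.get?_mk_cons, e0]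
    split_ifs <;> (try subst_vars) <;> simp_all <;> simp_all [eq_comm]
  by_cases h4 : s = "latin_1"
  · subst h4
    simp [pvGroups, pvLoopA, hd, e1, e2, e3, e4, PySem.Set.contains, PySem.Dict.get?_mk_cons, e0]
    split_ifs <;> (try subst_vars) <;> simp_all <;> simp_all [eq_comm]
  by_cases h5 : s = "iso_8859_1"
  · subst h5
    simp [pvGroups, pvLoopA, hd, e1, e2, e3, e4, PySem.Set.contains, PySem.Dict.get?_mk_cons, e0]
    split_ifs <;> (try subst_vars) <;> simp_all <;> simp_all [eq_comm]
  by_cases h6 : s = "latin1"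
  · subst h6
    simp [pvGroups, pvLoopA, hd, e1, e2, e3, e4, PySem.Set.contains, PySem.Dict.get?_mk_cons, e0]
    split_ifs <;> (try subst_vars) <;> simp_all <;> simp_all [eq_comm]
  by_cases h7 : s = "cp1252"
  · subst h7
    simp [pvGroups, pvLoopA, hd, e1, e2, e3, e4, PySem.Set.contains, PySem.Dict.get?_mk_cons, e0]
    split_ifs <;> (try subst_vars) <;> simp_all <;> simp_all [eq_comm]
  by_cases h8 : s = "windows_1252"
  · subst h8
    simp [pvGroups, pvLoopA, hd, e1, e2, e3, e4, PySem.Set.contains, PySem.Dict.get?_mk_cons, e0]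
    split_ifs <;> (try subst_vars) <;> simp_all <;> simp_all [eq_comm]
  have g0 : ("utf_8" = s) = False := eq_false (fun h => h0 h.symm)
  have g1 : ("utf8" = s) = False := eq_false (fun h => h1 h.symm)
  have g2 : ("utf_16" = s) = False := eq_false (fun h => h2 h.symm)
  have g3 : ("utf16" = s) = False := eq_false (fun h => h3 h.symm)
  have g4 : ("latin_1" = s) = False := eq_false (fun h => h4 h.symm)
  have g5 : ("iso_8859_1" = s) = False := eq_false (fun h => h5 h.symm)
  have g6 : ("latin1" = s) = False := eq_false (fun h => h6 h.symm)
  have g7 : ("cp1252" = s) = False := eq_false (fun h => h7 h.symm)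
  have g8 : ("windows_1252" = s) = False := eq_false (fun h => h8 h.symm)
  simp [pvGroups, pvLoopA, hd, e1, e2, e3, e4, PySem.Set.contains, PySem.Dict.get?_mk_cons, e0, h0, h1, h2, h3, h4, h5, h6, h7, h8, g0, g1, g2, g3, g4, g5, g6, g7, g8]

-- ===== VERDICT (by name: the statement is the Claim_ definition above) =====
theorem encodings_are_equivalent_py_spec : Claim_equal_encodings_are_equivalent_py := by
  intro source_enc target_enc _
  unfold Spec_encodings_are_equivalent_py encodings_are_equivalent_py encodings_are_equivalent_py_alt
  by_cases h : (pvNorm source_enc == pvNorm target_enc)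
  · simp [h]
  · simp only [h, Bool.false_eq_true, if_false]
    exact pv_key _ _
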